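-- pv_equiv track=rewrite | github.com/Vedantk1301/Muse_orchestrator | debug_qdrant_runner.py | _looks_like_filter_error
-- ===== SOURCE A (Python) =====
-- def _looks_like_filter_error(msg: str) -> bool:
--     msg = (msg or "").lower()
--     return any(
--         kw in msg
--         for kw in [
--             "index required",
--             "wrong input",
--             "keyword",
--             "field",
--             "matchany",
--             "match any",
--         ]
--     )
-- ===== SOURCE B (Python) =====
-- _KEYWORDS = (
--     "index required",
--     "wrong input",
--     "keyword",
--     "field",
--     "matchany",
--     "match any",
-- )
--
--
-- def _looks_like_filter_error(msg: str) -> bool: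
--     s = (msg or "").lower()
--     # single left-to-right pass: does any keyword start at position i?
--     for i in range(len(s) + 1):
--         if s.startswith(_KEYWORDS, i):
--             return True
--     return False
-- ===== Notes on version B (the rewrite author's own statement) =====
-- stated objective: alternative
-- what changed: Replaces any() over six independent substring searches with one left-to-right scan over positions using str.startswith with a keyword tuple and a start index.
import Mathlib
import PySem

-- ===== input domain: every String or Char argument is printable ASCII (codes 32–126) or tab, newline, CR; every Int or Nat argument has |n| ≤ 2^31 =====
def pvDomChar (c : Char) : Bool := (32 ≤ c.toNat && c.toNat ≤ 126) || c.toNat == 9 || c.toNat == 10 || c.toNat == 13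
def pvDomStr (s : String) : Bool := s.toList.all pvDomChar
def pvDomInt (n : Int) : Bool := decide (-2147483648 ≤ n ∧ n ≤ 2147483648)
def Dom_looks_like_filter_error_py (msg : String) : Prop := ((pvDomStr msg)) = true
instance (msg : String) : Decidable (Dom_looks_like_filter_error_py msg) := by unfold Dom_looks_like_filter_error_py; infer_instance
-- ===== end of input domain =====

-- B replaces any() over six independent substring searches by one left-to-right scan over
-- start positions with a startswith-against-a-keyword-tuple check (alternative decomposition).


-- ===== PORT A =====
def pvKeywordsA : List String :=
  ["index required", "wrong input", "keyword", "field", "matchany", "match any"]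

def looks_like_filter_error_py (msg : String) : Bool :=
  -- msg = (msg or "").lower()
  let m := PySem.Str.lower (if msg == "" then "" else msg)
  -- any(kw in msg for kw in [...])
  pvKeywordsA.any (fun kw => PySem.Str.isIn kw m)

-- ===== PORT B =====
-- _KEYWORDS tuple, as lists of chars
def pvKeywordsB : List (List Char) := pvKeywordsA.map String.toList

-- the `for i in range(len(s)+1): if s.startswith(_KEYWORDS, i)` loop, one suffix at a time
def pvScanKw : List Char → Bool
  | [] => pvKeywordsB.any (fun kw => kw.isPrefixOf ([] : List Char))
  | c :: t => pvKeywordsB.any (fun kw => kw.isPrefixOf (c :: t)) || pvScanKw t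

def looks_like_filter_error_py_alt (msg : String) : Bool :=
  let s := PySem.Str.lower (if msg == "" then "" else msg)
  pvScanKw s.toList

-- ===== PRECONDITION & SPEC =====
def Spec_looks_like_filter_error_py (msg : String) (out : Bool) : Prop := out = looks_like_filter_error_py_alt msg
instance (msg : String) (out : Bool) : Decidable (Spec_looks_like_filter_error_py msg out) := by unfold Spec_looks_like_filter_error_py; infer_instance

-- ===== CLAIM (what is proved, stated in full; the proofs are below) =====
def Claim_equal_looks_like_filter_error_py : Prop := ∀ (msg : String), Dom_looks_like_filter_error_py msg → Spec_looks_like_filter_error_py msg (looks_like_filter_error_py msg)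

-- ===== LEMMAS AND PROOFS =====
theorem pvScanKw_iff (cs : List Char) :
    pvScanKw cs = true ↔ ∃ kw ∈ pvKeywordsB, kw <:+: cs := by
  induction cs with
  | nil =>
    simp [pvScanKw, List.any_eq_true, List.isPrefixOf_iff_prefix]
  | cons c t ih =>
    simp only [pvScanKw, Bool.or_eq_true, List.any_eq_true,
      List.isPrefixOf_iff_prefix, ih, List.infix_cons_iff]
    constructor
    · rintro (⟨kw, hm, h⟩ | ⟨kw, hm, h⟩)
      · exact ⟨kw, hm, Or.inl h⟩
      · exact ⟨kw, hm, Or.inr h⟩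
    · rintro ⟨kw, hm, h | h⟩
      · exact Or.inl ⟨kw, hm, h⟩
      · exact Or.inr ⟨kw, hm, h⟩

-- ===== VERDICT (by name: the statement is the Claim_ definition above) =====
theorem looks_like_filter_error_py_spec : Claim_equal_looks_like_filter_error_py := by
  intro msg _
  unfold Spec_looks_like_filter_error_py
  unfold looks_like_filter_error_py looks_like_filter_error_py_alt
  rw [Bool.eq_iff_iff]
  simp only [List.any_eq_true, PySem.Str.isIn_iff_infix, pvScanKw_iff, pvKeywordsB,
    List.mem_map]
  constructor
  · rintro ⟨kw, hm, h⟩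
    exact ⟨kw.toList, ⟨kw, hm, rfl⟩, h⟩
  · rintro ⟨_, ⟨kw, hm, rfl⟩, h⟩
    exact ⟨kw, hm, h⟩
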